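-- pv_equiv track=rewrite | github.com/codyduong/hitokage | docs/gen_pages.py | split_generics
-- ===== SOURCE A (Python) =====
-- def split_generics(args: str) -> list[str]:
--     """Split generic arguments considering nested generics."""
--     depth = 0
--     result: list[str] = []
--     current: list[str] = []
--     for char in args:
--         if char == ',' and depth == 0:
--             result.append(''.join(current).strip())
--             current = []
--         else:
--             if char == '<':
--                 depth += 1
--             elif char == '>':
--                 depth -= 1
--             current.append(char)
--     if current:
--         result.append(''.join(current).strip())
--     return result
-- ===== SOURCE B (Python) =====
-- def split_generics(args: str) -> list[str]:
--     """Split generic arguments considering nested generics.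
--
--     Two-pass: record the indices of top-level commas, then slice."""
--     depth = 0
--     commas = []
--     for i, char in enumerate(args):
--         if char == '<':
--             depth += 1
--         elif char == '>':
--             depth -= 1
--         elif char == ',' and depth == 0:
--             commas.append(i)
--     parts = []
--     start = 0
--     for c in commas:
--         parts.append(args[start:c].strip())
--         start = c + 1
--     if start < len(args):
--         parts.append(args[start:].strip())
--     return parts
-- ===== Notes on version B (the rewrite author's own statement) =====
-- stated objective: alternative
-- what changed: Replaces the character-buffer accumulator with a two-pass index scheme: first collect the indices of depth-0 commas, then build the result by slicing the original string between consecutive recorded commas (final slice gated on raw remaining length).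
import Mathlib
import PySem

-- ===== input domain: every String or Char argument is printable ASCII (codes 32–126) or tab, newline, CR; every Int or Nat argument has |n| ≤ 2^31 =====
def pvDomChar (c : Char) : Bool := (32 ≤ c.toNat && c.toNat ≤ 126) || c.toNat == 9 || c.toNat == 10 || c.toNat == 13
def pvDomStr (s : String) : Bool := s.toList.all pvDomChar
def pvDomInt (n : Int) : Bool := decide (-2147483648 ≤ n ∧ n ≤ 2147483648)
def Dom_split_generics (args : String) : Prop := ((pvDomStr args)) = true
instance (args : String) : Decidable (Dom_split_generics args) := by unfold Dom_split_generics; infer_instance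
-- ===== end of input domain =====

-- B replaces A's character-buffer accumulator with a two-pass index scheme (collect
-- depth-0 comma indices, then slice the string between them); alternative decomposition, same cost.

-- ===== PORT A =====
-- depth update shared by the branch 'if char == '<': depth += 1 elif char == '>': depth -= 1'
def pvNd (d : Int) (c : Char) : Int := if c = '<' then d + 1 else if c = '>' then d - 1 else d

-- one iteration of A's loop; state = (depth, result, current)
def pvStepA (st : Int × List String × List Char) (c : Char) : Int × List String × List Char :=
  if c = ',' ∧ st.1 = 0 then (st.1, st.2.1 ++ [PySem.Str.strip (String.ofList st.2.2)], ([] : List Char))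
  else (pvNd st.1 c, st.2.1, st.2.2 ++ [c])

def split_generics (args : String) : List String :=
  let st := args.toList.foldl pvStepA (0, [], [])
  if st.2.2 ≠ [] then st.2.1 ++ [PySem.Str.strip (String.ofList st.2.2)] else st.2.1

-- ===== PORT B =====
-- first pass: collect indices of depth-0 commas; state = (depth, commas)
def pvStepB1 (st : Int × List Int) (p : Int × Char) : Int × List Int :=
  if p.2 = '<' then (st.1 + 1, st.2)
  else if p.2 = '>' then (st.1 - 1, st.2)
  else if p.2 = ',' ∧ st.1 = 0 then (st.1, st.2 ++ [p.1])
  else st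

-- second pass: slice between consecutive commas; state = (start, parts)
-- (the Python string slice args[start:c] is ported on code points: List.slice on toList)
def pvStepB2 (cs : List Char) (st : Int × List String) (c : Int) : Int × List String :=
  (c + 1, st.2 ++ [PySem.Str.strip (String.ofList (PySem.List.slice cs (some st.1) (some c)))])

def split_generics_alt (args : String) : List String :=
  let cs := args.toList
  let commas := ((PySem.List.enumerate cs 0).foldl pvStepB1 (0, [])).2
  let fin := commas.foldl (pvStepB2 cs) (0, [])
  if fin.1 < (cs.length : Int) then
    fin.2 ++ [PySem.Str.strip (String.ofList (PySem.List.slice cs (some fin.1) none))]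
  else fin.2

-- ===== PRECONDITION & SPEC =====
def Spec_split_generics (args : String) (out : List String) : Prop := out = split_generics_alt args
instance (args : String) (out : List String) : Decidable (Spec_split_generics args out) := by unfold Spec_split_generics; infer_instance

-- ===== CLAIM (what is proved, stated in full; the proofs are below) =====
def Claim_equal_split_generics : Prop := ∀ (args : String), Dom_split_generics args → Spec_split_generics args (split_generics args)

-- ===== LEMMAS AND PROOFS =====

def pvStripS (l : List Char) : String := PySem.Str.strip (String.ofList l)

-- prepend a prefix to the head segment
def pvConsH (pre : List Char) : List (List Char) → List (List Char)
  | [] => [pre]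
  | s :: ss => (pre ++ s) :: ss

-- raw segments of cs split at depth-0 commas (last segment always present, possibly empty)
def pvSegs : Int → List Char → List (List Char)
  | _, [] => [[]]
  | d, c :: cs => if c = ',' ∧ d = 0 then [] :: pvSegs d cs else pvConsH [c] (pvSegs (pvNd d c) cs)

-- relative positions of depth-0 commas
def pvPosns : Int → List Char → List Nat
  | _, [] => []
  | d, c :: cs => if c = ',' ∧ d = 0 then 0 :: (pvPosns d cs).map (· + 1)
                  else (pvPosns (pvNd d c) cs).map (· + 1)

-- what both programs produce from segments: strip each, drop a trailing empty raw segment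
def pvEmit : List (List Char) → List String
  | [] => []
  | [c] => if c = [] then [] else [pvStripS c]
  | c :: rest => pvStripS c :: pvEmit rest

def pvFinA (st : Int × List String × List Char) : List String :=
  if st.2.2 ≠ [] then st.2.1 ++ [pvStripS st.2.2] else st.2.1

def pvFinB (cs : List Char) (st : Int × List String) : List String :=
  if st.1 < (cs.length : Int) then st.2 ++ [pvStripS (PySem.List.slice cs (some st.1) none)] else st.2

-- B's second pass in Nat form
def pvGoB (full : List Char) : Nat → List Nat → List String
  | start, [] => if start < full.length then [pvStripS (full.drop start)] else []
  | start, p :: ps => pvStripS ((full.drop start).take (p - start)) :: pvGoB full (p + 1) ps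

theorem pvSegs_ne_nil (d : Int) (cs : List Char) : pvSegs d cs ≠ [] := by
  cases cs with
  | nil => simp [pvSegs]
  | cons c cs =>
    simp only [pvSegs]
    split
    · simp
    · cases pvSegs (pvNd d c) cs <;> simp [pvConsH]

theorem pvConsH_consH (a b : List Char) (ss : List (List Char)) :
    pvConsH a (pvConsH b ss) = pvConsH (a ++ b) ss := by
  cases ss <;> simp [pvConsH]

theorem pvConsH_nil {ss : List (List Char)} (h : ss ≠ []) : pvConsH [] ss = ss := by
  cases ss with
  | nil => exact absurd rfl h
  | cons s ss => simp [pvConsH]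

theorem pvEmit_cons (c : List Char) {ss : List (List Char)} (h : ss ≠ []) :
    pvEmit (c :: ss) = pvStripS c :: pvEmit ss := by
  cases ss with
  | nil => exact absurd rfl h
  | cons s ss => rfl

theorem pvShift (k : Int) (ps : List Nat) :
    (ps.map (· + 1)).map (fun (p : Nat) => k + (p : Int)) = ps.map (fun (p : Nat) => (k + 1) + (p : Int)) := by
  rw [List.map_map]
  apply List.map_congr_left
  intro p _
  simp only [Function.comp_apply]
  omega

theorem pvShiftNat (j : Nat) (ps : List Nat) :
    (ps.map (· + 1)).map (· + j) = ps.map (· + (j + 1)) := by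
  rw [List.map_map]
  apply List.map_congr_left
  intro p _
  simp only [Function.comp_apply]
  omega

theorem pvLemA (cs : List Char) (d : Int) (res : List String) (cur : List Char) :
    pvFinA (cs.foldl pvStepA (d, res, cur)) = res ++ pvEmit (pvConsH cur (pvSegs d cs)) := by
  induction cs generalizing d res cur with
  | nil =>
    simp only [List.foldl_nil, pvFinA, pvSegs, pvConsH, List.append_nil, pvEmit]
    by_cases h : cur = [] <;> simp [h, pvStripS]
  | cons c cs ih =>
    simp only [List.foldl_cons]
    by_cases h : c = ',' ∧ d = 0
    · obtain ⟨hc, hd⟩ := h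
      subst hc; subst hd
      rw [show pvStepA (0, res, cur) ',' = (0, res ++ [PySem.Str.strip (String.ofList cur)], ([] : List Char)) from by simp [pvStepA]]
      rw [ih]
      have hne := pvSegs_ne_nil 0 cs
      rw [show pvSegs 0 (',' :: cs) = [] :: pvSegs 0 cs from by simp [pvSegs]]
      rw [pvConsH_nil hne]
      rw [show pvConsH cur ([] :: pvSegs 0 cs) = cur :: pvSegs 0 cs from by simp [pvConsH]]
      rw [pvEmit_cons cur hne, List.append_assoc]
      simp [pvStripS]
    · rw [show pvStepA (d, res, cur) c = (pvNd d c, res, cur ++ [c]) from by simp [pvStepA, h]]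
      rw [ih]
      rw [show pvSegs d (c :: cs) = pvConsH [c] (pvSegs (pvNd d c) cs) from by simp [pvSegs, h]]
      rw [pvConsH_consH]

theorem pvLemB1 (cs : List Char) (d : Int) (k : Int) (acc : List Int) :
    ((PySem.List.enumerate cs k).foldl pvStepB1 (d, acc)).2
      = acc ++ (pvPosns d cs).map (fun (p : Nat) => k + (p : Int)) := by
  induction cs generalizing d k acc with
  | nil => simp [PySem.List.enumerate_nil, pvPosns]
  | cons c cs ih =>
    rw [PySem.List.enumerate_cons, List.foldl_cons]
    by_cases h1 : c = '<'
    · subst h1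
      rw [show pvStepB1 (d, acc) (k, '<') = (d + 1, acc) from by simp [pvStepB1]]
      rw [ih]
      rw [show pvPosns d ('<' :: cs) = (pvPosns (d + 1) cs).map (· + 1) from by simp [pvPosns, pvNd]]
      rw [pvShift]
    · by_cases h2 : c = '>'
      · subst h2
        rw [show pvStepB1 (d, acc) (k, '>') = (d - 1, acc) from by simp [pvStepB1]]
        rw [ih]
        rw [show pvPosns d ('>' :: cs) = (pvPosns (d - 1) cs).map (· + 1) from by simp [pvPosns, pvNd]]
        rw [pvShift]
      · by_cases h3 : c = ',' ∧ d = 0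
        · obtain ⟨hc, hd⟩ := h3
          subst hc; subst hd
          rw [show pvStepB1 (0, acc) (k, ',') = ((0 : Int), acc ++ [k]) from by simp [pvStepB1]]
          rw [ih]
          rw [show pvPosns 0 (',' :: cs) = 0 :: (pvPosns 0 cs).map (· + 1) from by simp [pvPosns]]
          rw [List.map_cons, pvShift, List.append_assoc]
          norm_num
        · rw [show pvStepB1 (d, acc) (k, c) = (d, acc) from by simp [pvStepB1, h1, h2, h3]]
          rw [ih]
          rw [show pvPosns d (c :: cs) = (pvPosns (pvNd d c) cs).map (· + 1) from by simp [pvPosns, h3]]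
          rw [show pvNd d c = d from by simp [pvNd, h1, h2]]
          rw [pvShift]

theorem pvLemB2 (cs : List Char) (ps : List Nat) (start : Nat) (parts : List String) :
    pvFinB cs ((ps.map (fun (p : Nat) => (p : Int))).foldl (pvStepB2 cs) (((start : Nat) : Int), parts))
      = parts ++ pvGoB cs start ps := by
  induction ps generalizing start parts with
  | nil =>
    simp only [List.map_nil, List.foldl_nil, pvFinB, pvGoB,
      PySem.List.slice_from_natCast]
    by_cases h : start < cs.length
    · rw [if_pos (by exact_mod_cast h), if_pos h]
    · rw [if_neg (by exact_mod_cast h), if_neg h, List.append_nil]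
  | cons p ps ih =>
    simp only [List.map_cons, List.foldl_cons, pvStepB2, pvGoB]
    rw [PySem.List.slice_natCast]
    have h1 : ((p : Int) + 1) = (((p + 1 : Nat) : Nat) : Int) := by push_cast; ring
    rw [h1, ih, List.append_assoc]
    simp [pvStripS]

theorem pvGoB_segs (cs : List Char) (d : Int) (full : List Char) (start j : Nat)
    (hsj : start ≤ j) (hjl : j ≤ full.length) (hdrop : full.drop j = cs) :
    pvGoB full start ((pvPosns d cs).map (· + j))
      = pvEmit (pvConsH ((full.drop start).take (j - start)) (pvSegs d cs)) := by
  induction cs generalizing d start j with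
  | nil =>
    have hj : j = full.length := by
      have := congrArg List.length hdrop
      simp [List.length_drop] at this
      omega
    subst hj
    simp only [pvPosns, List.map_nil, pvGoB, pvSegs, pvConsH, List.append_nil, pvEmit]
    have htake : (full.drop start).take (full.length - start) = full.drop start := by
      apply List.take_of_length_le
      simp [List.length_drop]
    rw [htake]
    by_cases h : start < full.length
    · rw [if_pos h, if_neg (by simp [List.drop_eq_nil_iff]; omega)]
    · rw [if_neg h, if_pos (by simp [List.drop_eq_nil_iff]; omega)]
  | cons c cs ih =>
    have hjlt : j < full.length := by
      have := congrArg List.length hdrop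
      simp [List.length_drop] at this
      omega
    have hdrop' : full.drop (j + 1) = cs := by
      have h' : full.drop (j + 1) = (full.drop j).drop 1 := by
        rw [List.drop_drop]
      rw [h', hdrop, List.drop_one, List.tail_cons]
    have hget : full[j]? = some c := by
      have h0 : (full.drop j)[0]? = full[j + 0]? := (List.getElem?_drop : (full.drop j)[0]? = full[j + 0]?)
      rw [hdrop] at h0
      simpa using h0.symm
    by_cases h : c = ',' ∧ d = 0
    · obtain ⟨hc, hd⟩ := h
      subst hc; subst hd
      rw [show pvPosns 0 (',' :: cs) = 0 :: (pvPosns 0 cs).map (· + 1) from by simp [pvPosns]]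
      rw [List.map_cons, pvShiftNat, Nat.zero_add]
      simp only [pvGoB]
      rw [ih 0 (j + 1) (j + 1) (le_refl _) (by omega) hdrop']
      rw [show (j + 1) - (j + 1) = 0 from by omega, List.take_zero]
      have hne := pvSegs_ne_nil 0 cs
      rw [pvConsH_nil hne]
      rw [show pvSegs 0 (',' :: cs) = [] :: pvSegs 0 cs from by simp [pvSegs]]
      rw [show pvConsH ((full.drop start).take (j - start)) ([] :: pvSegs 0 cs)
           = ((full.drop start).take (j - start)) :: pvSegs 0 cs from by simp [pvConsH]]
      rw [pvEmit_cons _ hne]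
    · rw [show pvPosns d (c :: cs) = (pvPosns (pvNd d c) cs).map (· + 1) from by simp [pvPosns, h]]
      rw [pvShiftNat]
      rw [ih (pvNd d c) start (j + 1) (by omega) (by omega) hdrop']
      rw [show pvSegs d (c :: cs) = pvConsH [c] (pvSegs (pvNd d c) cs) from by simp [pvSegs, h]]
      rw [pvConsH_consH]
      congr 2
      rw [show (j + 1) - start = (j - start) + 1 from by omega, List.take_add_one]
      congr 1
      have h0 : (full.drop start)[j - start]? = full[start + (j - start)]? := (List.getElem?_drop : (full.drop start)[j - start]? = full[start + (j - start)]?)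
      rw [h0, show start + (j - start) = j from by omega, hget]
      rfl

theorem pvA_eq (cs : List Char) :
    pvFinA (cs.foldl pvStepA (0, [], [])) = pvEmit (pvSegs 0 cs) := by
  rw [pvLemA, pvConsH_nil (pvSegs_ne_nil 0 cs), List.nil_append]

theorem pvB_eq (cs : List Char) :
    pvFinB cs (((((PySem.List.enumerate cs 0).foldl pvStepB1 (0, [])).2).foldl (pvStepB2 cs)) (0, []))
      = pvEmit (pvSegs 0 cs) := by
  rw [pvLemB1, List.nil_append]
  rw [show (pvPosns 0 cs).map (fun (p : Nat) => (0 : Int) + (p : Int))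
        = (pvPosns 0 cs).map (fun (p : Nat) => (p : Int)) from
      List.map_congr_left (fun p _ => by omega)]
  rw [show ((0 : Int), ([] : List String)) = ((((0 : Nat) : Nat) : Int), ([] : List String)) from by norm_num]
  rw [pvLemB2, List.nil_append]
  rw [show pvPosns 0 cs = (pvPosns 0 cs).map (· + 0) from by simp]
  rw [pvGoB_segs cs 0 cs 0 0 (le_refl _) (by omega) (by simp)]
  rw [List.take_zero, pvConsH_nil (pvSegs_ne_nil 0 cs)]

-- ===== VERDICT (by name: the statement is the Claim_ definition above) =====
theorem split_generics_spec : Claim_equal_split_generics := by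
  intro args _
  unfold Spec_split_generics split_generics split_generics_alt
  have hA := pvA_eq args.toList
  have hB := pvB_eq args.toList
  simp only [pvFinA, pvFinB, pvStripS] at hA hB
  simp only []
  rw [hA, hB]
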